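-- pv_equiv track=rewrite | github.com/banchoban/tasksNT | task1/task1.py | round_arr_path
-- ===== SOURCE A (Python) =====
-- def round_arr_path(n: int, m: int) -> str:
--
--     path = ''
--     i = 1
--
--     while True:
--         path += str(i)
--         i = 1 + (i + m - 2) % n
--
--         if i == 1:
--             break
--
--     return path
-- ===== SOURCE B (Python) =====
-- def _gcd(a, b):
--     while b:
--         a, b = b, a % b
--     return a
--
--
-- def round_arr_path(n: int, m: int) -> str:
--     s = (m - 1) % n
--     cycle_len = abs(n) // _gcd(abs(n), abs(s))
--     return ''.join(str(1 + (k * s) % n) for k in range(cycle_len))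
-- ===== Notes on version B (the rewrite author's own statement) =====
-- stated objective: alternative
-- what changed: Replaces A's step-by-step additive modular walk (while-loop carrying the current position) with a closed form: the k-th position is 1+(k*((m-1)%n))%n, emitted for k in range(|n|/gcd(|n|,|s|)) where the gcd gives the cycle length up front, joined in one pass.
import Mathlib
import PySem

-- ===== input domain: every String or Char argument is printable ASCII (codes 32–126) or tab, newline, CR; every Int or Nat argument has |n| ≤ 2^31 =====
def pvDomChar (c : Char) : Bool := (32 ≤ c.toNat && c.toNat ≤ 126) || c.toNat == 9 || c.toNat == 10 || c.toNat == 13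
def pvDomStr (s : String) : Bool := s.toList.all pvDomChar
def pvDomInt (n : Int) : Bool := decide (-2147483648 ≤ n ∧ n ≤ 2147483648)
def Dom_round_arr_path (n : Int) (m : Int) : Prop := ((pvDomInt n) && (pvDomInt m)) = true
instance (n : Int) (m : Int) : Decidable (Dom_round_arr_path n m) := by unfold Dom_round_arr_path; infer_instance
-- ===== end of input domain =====

-- B replaces A's step-by-step modular walk by the closed form 1+(k*((m-1)%n))%n over a
-- gcd-computed cycle length (alternative decomposition; same asymptotic cost).

-- ===== PORT A =====
-- A's 'while True' loop; fuel n.natAbs is a totality guard only (on Pre_ the walk provably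
-- returns to 1 within |n| iterations, so the fuel-exhausted branch is never the exit taken).
def pvAWalk (n m : Int) : Nat → Int → List Char → List Char
  | 0, _, path => path
  | f+1, i, path =>
    let path' := path ++ PySem.Int.toChars i
    let i' := 1 + PySem.Int.mod (i + m - 2) n
    if i' = 1 then path' else pvAWalk n m f i' path'

def round_arr_path (n : Int) (m : Int) : String :=
  String.ofList (pvAWalk n m n.natAbs 1 [])

-- ===== PORT B =====
-- Source B's hand-written Euclid helper _gcd, ported step for step
def pvGcdB : Nat → Nat → Nat
  | a, 0 => a
  | a, Nat.succ b => pvGcdB (Nat.succ b) (a % Nat.succ b)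
decreasing_by exact Nat.mod_lt _ (Nat.succ_pos b)

def round_arr_path_alt (n : Int) (m : Int) : String :=
  let s := PySem.Int.mod (m - 1) n
  let cycleLen := n.natAbs / pvGcdB n.natAbs s.natAbs
  String.ofList (PySem.Chars.join []
    ((PySem.List.pyRange 0 (cycleLen : Int) 1).map
      (fun k => PySem.Int.toChars (1 + PySem.Int.mod (k * s) n))))

-- ===== PRECONDITION & SPEC =====
-- n = 0 makes '% n' raise ZeroDivisionError in A (and in B); both return on every other input.
def Pre_round_arr_path (n : Int) (m : Int) : Prop := n ≠ 0
instance (n : Int) (m : Int) : Decidable (Pre_round_arr_path n m) := by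
  unfold Pre_round_arr_path; infer_instance

def pvWitness_round_arr_path : Int × Int := (6, 3)

def Spec_round_arr_path (n : Int) (m : Int) (out : String) : Prop := out = round_arr_path_alt n m
instance (n : Int) (m : Int) (out : String) : Decidable (Spec_round_arr_path n m out) := by
  unfold Spec_round_arr_path; infer_instance

-- ===== CLAIM (what is proved, stated in full; the proofs are below) =====
def Claim_equal_round_arr_path : Prop := ∀ (n : Int) (m : Int), Dom_round_arr_path n m → Pre_round_arr_path n m → Spec_round_arr_path n m (round_arr_path n m)

-- ===== LEMMAS AND PROOFS =====

-- the step value s = (m-1) % n and the cycle length L = |n| / gcd(|n|, |s|)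
def pvS (n m : Int) : Int := PySem.Int.mod (m - 1) n
def pvL (n m : Int) : Nat := n.natAbs / Nat.gcd n.natAbs (pvS n m).natAbs

theorem pvGcdB_eq (a b : Nat) : pvGcdB a b = Nat.gcd b a := by
  induction a, b using pvGcdB.induct with
  | case1 a => simp [pvGcdB]
  | case2 a b ih => rw [pvGcdB, ih, Nat.gcd_succ]

theorem pvJoinNil (ps : List (List Char)) : PySem.Chars.join [] ps = ps.flatten := by
  induction ps with
  | nil => simp [PySem.Chars.join, List.intercalate]
  | cons p ps ih =>
    cases ps with
    | nil => simp [PySem.Chars.join, List.intercalate]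
    | cons q qs =>
      simp only [PySem.Chars.join, List.intercalate] at ih ⊢
      simp [List.intersperse, List.flatten] at ih ⊢
      exact ih

-- Python % n absorbs an inner % n in a sum, for every n ≠ 0 (both divisor signs)
theorem pvMod_add_left (n a b : Int) (hn : n ≠ 0) :
    PySem.Int.mod (PySem.Int.mod a n + b) n = PySem.Int.mod (a + b) n := by
  rcases lt_or_gt_of_ne hn with hneg | hpos
  · have hp : (0:Int) < -n := by omega
    have key : ∀ x : Int, PySem.Int.mod x n = -PySem.Int.mod (-x) (-n) := by
      intro x
      have h0 := PySem.Int.mod_neg_neg (-x) (-n)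
      simp only [neg_neg] at h0
      omega
    simp only [key, PySem.Int.mod_eq_emod_of_pos hp]
    have h : -(-(-a % -n) + b) = -a % -n + -b := by ring
    rw [h, Int.emod_add_emod]
    congr 2
    ring
  · rw [PySem.Int.mod_eq_emod_of_pos hpos, PySem.Int.mod_eq_emod_of_pos hpos,
        PySem.Int.mod_eq_emod_of_pos hpos]
    exact Int.emod_add_emod a n b

theorem pvMod_add_right (n a b : Int) (hn : n ≠ 0) :
    PySem.Int.mod (a + PySem.Int.mod b n) n = PySem.Int.mod (a + b) n := by
  rw [add_comm a, pvMod_add_left n b a hn, add_comm]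

-- one loop iteration advances the closed-form index by one
theorem pvStep (n m : Int) (hn : n ≠ 0) (k : Int) :
    1 + PySem.Int.mod ((1 + PySem.Int.mod (k * pvS n m) n) + m - 2) n
      = 1 + PySem.Int.mod ((k + 1) * pvS n m) n := by
  have h1 : (1 + PySem.Int.mod (k * pvS n m) n) + m - 2
      = PySem.Int.mod (k * pvS n m) n + (m - 1) := by ring
  rw [h1, pvMod_add_left n _ _ hn]
  rw [← pvMod_add_right n (k * pvS n m) (m - 1) hn]
  congr 2
  simp only [pvS]
  ring

theorem pvDvdIff (N S j : Nat) (hN : 0 < N) : N ∣ j * S ↔ N / Nat.gcd N S ∣ j := by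
  set g := Nat.gcd N S with hg
  have hgpos : 0 < g := Nat.gcd_pos_of_pos_left S hN
  obtain ⟨v, hv⟩ : g ∣ N := Nat.gcd_dvd_left N S
  obtain ⟨u, hu⟩ : g ∣ S := Nat.gcd_dvd_right N S
  have hNg : N / g = v := by rw [hv, Nat.mul_div_cancel_left v hgpos]
  have hSg : S / g = u := by rw [hu, Nat.mul_div_cancel_left u hgpos]
  have hco : Nat.Coprime v u := by
    have := Nat.coprime_div_gcd_div_gcd (m := N) (n := S) hgpos
    rwa [← hg, hNg, hSg] at this
  rw [hNg]
  constructor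
  · intro h
    have h2 : g * v ∣ g * (j * u) := by
      rw [← hv]
      calc N ∣ j * S := h
        _ = g * (j * u) := by rw [hu]; ring
    exact hco.dvd_of_dvd_mul_right ((Nat.mul_dvd_mul_iff_left hgpos).mp h2)
  · rintro ⟨t, rfl⟩
    exact ⟨t * u, by rw [hv, hu]; ring⟩

-- the walk is back at 1 exactly at multiples of the cycle length
theorem pvZeroIff (n m : Int) (hn : n ≠ 0) (j : Nat) :
    PySem.Int.mod ((j : Int) * pvS n m) n = 0 ↔ pvL n m ∣ j := by
  rw [PySem.Int.mod_eq_zero_iff_dvd]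
  have hN : 0 < n.natAbs := Int.natAbs_pos.mpr hn
  rw [← Int.natAbs_dvd_natAbs, Int.natAbs_mul, Int.natAbs_natCast]
  exact pvDvdIff n.natAbs (pvS n m).natAbs j hN

theorem pvLpos (n m : Int) (hn : n ≠ 0) : 0 < pvL n m := by
  have hN : 0 < n.natAbs := Int.natAbs_pos.mpr hn
  exact Nat.div_pos (Nat.le_of_dvd hN (Nat.gcd_dvd_left _ _)) (Nat.gcd_pos_of_pos_left _ hN)

theorem pvWalkEq (n m : Int) (hn : n ≠ 0) :
    ∀ (f k : Nat) (acc : List Char), k < pvL n m → pvL n m ≤ k + f →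
      pvAWalk n m f (1 + PySem.Int.mod ((k : Int) * pvS n m) n) acc
        = acc ++ ((List.range (pvL n m - k)).map
            (fun t => PySem.Int.toChars (1 + PySem.Int.mod (((k + t : Nat) : Int) * pvS n m) n))).flatten := by
  intro f
  induction f with
  | zero => intro k acc hk hf; omega
  | succ f ih =>
    intro k acc hk hf
    rw [pvAWalk]
    simp only [pvStep n m hn (k : Int)]
    have hcast : ((k : Int) + 1) = ((k + 1 : Nat) : Int) := by push_cast; ring
    have hiff : (1 + PySem.Int.mod (((k:Int) + 1) * pvS n m) n = 1) ↔ pvL n m ∣ (k + 1) := by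
      rw [hcast]
      constructor
      · intro h
        exact (pvZeroIff n m hn (k + 1)).mp (by omega)
      · intro h
        have := (pvZeroIff n m hn (k + 1)).mpr h
        omega
    by_cases hbr : 1 + PySem.Int.mod (((k:Int) + 1) * pvS n m) n = 1
    · have hdvd : pvL n m ∣ k + 1 := hiff.mp hbr
      have hkL : k + 1 = pvL n m :=
        Nat.le_antisymm (by omega) (Nat.le_of_dvd (Nat.succ_pos k) hdvd)
      have h1 : pvL n m - k = 1 := by omega
      simp [hbr, h1]
    · have hlt : k + 1 < pvL n m := by
        by_contra hge
        have heq : k + 1 = pvL n m := by omega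
        exact hbr (hiff.mpr (by rw [heq]))
      simp only [if_neg hbr]
      rw [hcast]
      have hf' : pvL n m ≤ (k + 1) + f := by omega
      rw [ih (k + 1) (acc ++ PySem.Int.toChars (1 + PySem.Int.mod ((k : Int) * pvS n m) n)) hlt hf']
      have hrange : pvL n m - k = (pvL n m - (k + 1)) + 1 := by omega
      rw [hrange, List.range_succ_eq_map, List.map_cons, List.map_map, List.flatten_cons,
          List.append_assoc]
      simp only [Nat.add_zero]
      congr 3
      apply List.map_congr_left
      intro t _
      simp only [Function.comp_apply]
      have hc2 : k + Nat.succ t = k + 1 + t := by omega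
      rw [hc2]

-- ===== VERDICT (by name: the statement is the Claim_ definition above) =====
theorem round_arr_path_spec : Claim_equal_round_arr_path := by
  intro n m _ hn
  unfold Spec_round_arr_path round_arr_path round_arr_path_alt
  have hn' : n ≠ 0 := hn
  have hw := pvWalkEq n m hn' n.natAbs 0 [] (pvLpos n m hn')
      (by simpa using Nat.div_le_self n.natAbs _)
  have hmod0 : PySem.Int.mod 0 n = 0 := (PySem.Int.mod_eq_zero_iff_dvd 0 n).mpr (dvd_zero n)
  simp only [Nat.cast_zero, zero_mul, hmod0, add_zero, Nat.zero_add, Nat.sub_zero,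
      List.nil_append] at hw
  rw [hw]
  have hgcd : pvGcdB n.natAbs (pvS n m).natAbs = Nat.gcd n.natAbs (pvS n m).natAbs := by
    rw [pvGcdB_eq, Nat.gcd_comm]
  simp only [pvS] at hgcd
  simp only [hgcd, pvJoinNil, PySem.List.pyRange_one]
  congr 1
  rw [List.map_map]
  simp only [sub_zero, Int.toNat_natCast]
  have hLdef : pvL n m = n.natAbs / Nat.gcd n.natAbs (PySem.Int.mod (m - 1) n).natAbs := by
    simp [pvL, pvS]
  rw [hLdef]
  congr 1
  apply List.map_congr_left
  intro t _
  simp [pvS]
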